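-- pv_equiv track=rewrite | github.com/richardfearn/advent-of-code-2020 | day8/__init__.py | find_subprograms
-- ===== SOURCE A (Python) =====
-- JMP = "jmp"
--
-- def find_subprograms(instructions):
--
--     # Makes it easier to find connected components
--     graph = undirected_graph(instructions)
--
--     components = []
--     search_start_remaining = set(range(len(instructions)))
--
--     while len(search_start_remaining) > 0:
--
--         search_start = search_start_remaining.pop()
--         visited = set()
--         to_explore = [search_start]
--
--         while len(to_explore) > 0:
--             next_node = to_explore.pop(0)
--             if next_node not in visited:
--                 if next_node in search_start_remaining:
--                     search_start_remaining.remove(next_node)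
--                 visited.add(next_node)
--                 to_explore += graph[next_node]
--
--         components.append(visited)
--
--     return components
--
-- def undirected_graph(instructions):
--
--     graph = {pc: [] for pc in range(len(instructions))}
--
--     for pc, (op, arg) in enumerate(instructions):
--
--         next_pc = (pc + arg) if (op == JMP) else (pc + 1)
--
--         if next_pc < len(instructions):
--             graph[pc].append(next_pc)
--             graph[next_pc].append(pc)
--
--     return graph
-- ===== SOURCE B (Python) =====
-- JMP = "jmp"
--
-- def find_subprograms(instructions):
--     n = len(instructions)
--     labels = list(range(n))
--     while True:
--         new = list(labels)
--         for pc, (op, arg) in enumerate(instructions):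
--             next_pc = (pc + arg) if (op == JMP) else (pc + 1)
--             if next_pc < n:
--                 m = min(new[pc], new[next_pc])
--                 new[pc] = m
--                 new[next_pc] = m
--         if new == labels:
--             break
--         labels = new
--     return [{x for x in range(n) if labels[x] == m} for m in sorted(set(labels))]
-- ===== Notes on version B (the rewrite author's own statement) =====
-- stated objective: alternative
-- what changed: BFS over an explicitly built undirected adjacency dict (frontier queue per start, popped from a remaining-set) is replaced by Gauss-Seidel minimum-label propagation: every node starts labelled with its own index, sweeps over the instruction list shrink labels along jump edges until a fixpoint, and the components are read off by grouping equal labels; no graph dict, queue or visited set is maintained.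
import Mathlib
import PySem

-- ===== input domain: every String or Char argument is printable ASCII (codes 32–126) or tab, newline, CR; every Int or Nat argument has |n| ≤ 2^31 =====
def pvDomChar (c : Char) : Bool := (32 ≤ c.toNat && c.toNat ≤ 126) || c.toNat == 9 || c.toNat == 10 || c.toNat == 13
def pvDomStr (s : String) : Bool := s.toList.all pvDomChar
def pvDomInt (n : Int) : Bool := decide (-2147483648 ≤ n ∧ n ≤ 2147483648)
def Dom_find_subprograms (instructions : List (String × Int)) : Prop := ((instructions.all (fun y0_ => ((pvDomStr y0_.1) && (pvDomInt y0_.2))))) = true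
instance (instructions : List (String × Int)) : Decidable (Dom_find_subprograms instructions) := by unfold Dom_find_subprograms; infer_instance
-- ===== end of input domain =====

-- B replaces A's BFS (adjacency dict + frontier queue + remaining set) by Gauss–Seidel
-- minimum-label propagation to a fixpoint, reading components off by grouping equal labels.

-- ===== PORT A =====
def pvJMP : String := "jmp"

-- next_pc = (pc + arg) if (op == JMP) else (pc + 1)
def pvNext (pc : Int) (ins : String × Int) : Int :=
  if ins.1 == pvJMP then pc + ins.2 else pc + 1

-- graph = {pc: [] for pc in range(len(instructions))}
def pvGraphInit (n : Int) : PySem.Dict Int (List Int) :=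
  (PySem.List.pyRange 0 n 1).foldl (fun d pc => d.insert pc ([] : List Int)) PySem.Dict.empty

-- graph[k].append(v) is modify k [] (· ++ [v]).  Python raises KeyError when the key is
-- absent (exactly when next_pc < 0) where modify would use the default: those inputs are
-- excluded by Pre_find_subprograms.
def undirected_graph (instructions : List (String × Int)) : PySem.Dict Int (List Int) :=
  (PySem.List.enumerate instructions).foldl
    (fun g e =>
      let next_pc := pvNext e.1 e.2
      if next_pc < PySem.List.len instructions then
        (g.modify e.1 [] (· ++ [next_pc])).modify next_pc [] (· ++ [e.1])
      else g)
    (pvGraphInit (PySem.List.len instructions))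

-- the inner `while len(to_explore) > 0:` loop.  The fuel only makes the loop total: each
-- iteration pops one queue element and the queue grows only by adjacency lists of newly
-- visited nodes, so 1 + |queue| + (total adjacency length) iterations always finish it.
def pvBfs (g : PySem.Dict Int (List Int)) :
    Nat → PySem.Set Int → List Int → PySem.Set Int → PySem.Set Int × PySem.Set Int
  | 0, visited, _, rem => (visited, rem)
  | fuel+1, visited, to_explore, rem =>
    match to_explore with
    | [] => (visited, rem)
    | next_node :: rest =>
      if visited.contains next_node then pvBfs g fuel visited rest rem
      else
        pvBfs g fuel (visited.add next_node) (rest ++ g.getD next_node [])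
          (rem.discard next_node)

-- the outer `while len(search_start_remaining) > 0:` loop (one whole component is removed
-- per iteration, so fuel n+1 always finishes it).
-- `search_start_remaining.pop()`: PySem does not model hash order, so this is hand-ported;
-- for CPython sets holding distinct ints of range(n) (hash(i)=i, slot=i, search finger
-- always at/below every remaining slot) pop() returns the SMALLEST remaining element, so
-- it is ported as min — exact on this domain (checked against CPython).
-- `components.append(visited)` appends a Python set value; set values are represented
-- canonically in ascending order (outputs of set type are compared as sets).
def pvOuter (g : PySem.Dict Int (List Int)) (n : Nat) :
    Nat → PySem.Set Int → List (List Int) → List (List Int)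
  | 0, _, components => components
  | fuel+1, rem, components =>
    match PySem.List.min? rem (fun x => x) with
    | none => components
    | some search_start =>
      let p := pvBfs g (2 * n + 2) PySem.Set.empty [search_start]
        (rem.discard search_start)
      pvOuter g n fuel p.2 (components ++ [PySem.List.sorted p.1 (fun x => x)])

def find_subprograms (instructions : List (String × Int)) : List (List Int) :=
  let graph := undirected_graph instructions
  pvOuter graph instructions.length (instructions.length + 1)
    (PySem.Set.ofList (PySem.List.pyRange 0 (PySem.List.len instructions) 1)) []

-- ===== PORT B =====
-- one sweep: `for pc, (op, arg) in enumerate(instructions): ...` shrinking labels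
def pvSweep (instructions : List (String × Int)) (labels : List Int) : List Int :=
  (PySem.List.enumerate instructions).foldl
    (fun l e =>
      let next_pc := if e.2.1 == "jmp" then e.1 + e.2.2 else e.1 + 1
      if next_pc < PySem.List.len instructions then
        let m := min (PySem.List.pyGetD l e.1 0) (PySem.List.pyGetD l next_pc 0)
        PySem.List.pySetD (PySem.List.pySetD l e.1 m) next_pc m
      else l)
    labels

-- `while True: new = list(labels); <sweep new in place>; if new == labels: break; labels = new`
-- Every non-final sweep strictly decreases the nonnegative label sum, which starts below
-- n*n, so fuel n*n+1 makes the loop total.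
def pvPropagate (instructions : List (String × Int)) : Nat → List Int → List Int
  | 0, labels => labels
  | fuel+1, labels =>
    let new := pvSweep instructions labels
    if new == labels then labels else pvPropagate instructions fuel new

def find_subprograms_alt (instructions : List (String × Int)) : List (List Int) :=
  let labels := pvPropagate instructions
    (instructions.length * instructions.length + 1)
    (PySem.List.pyRange 0 (PySem.List.len instructions) 1)
  (PySem.List.sorted (PySem.Set.ofList labels) (fun x => x)).map
    (fun m => PySem.Set.ofList
      ((PySem.List.pyRange 0 (PySem.List.len instructions) 1).filter
        (fun x => PySem.List.pyGetD labels x 0 == m)))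

-- ===== PRECONDITION & SPEC =====
-- Pre_ excludes exactly the inputs on which A raises: a "jmp" whose target pc+arg is
-- negative makes A's undirected_graph evaluate graph[next_pc] for an absent key (KeyError).
def Pre_find_subprograms (instructions : List (String × Int)) : Prop :=
  ∀ (pc : Nat) (h : pc < instructions.length),
    (instructions[pc]).1 = "jmp" → 0 ≤ (pc : Int) + (instructions[pc]).2

instance (instructions : List (String × Int)) : Decidable (Pre_find_subprograms instructions) := by
  unfold Pre_find_subprograms; infer_instance

def pvWitness_find_subprograms : (List (String × Int)) :=
  [("jmp", 2), ("acc", 1), ("jmp", -1), ("nop", 0)]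

def Spec_find_subprograms (instructions : List (String × Int)) (out : List (List Int)) : Prop :=
  out = find_subprograms_alt instructions

instance (instructions : List (String × Int)) (out : List (List Int)) :
    Decidable (Spec_find_subprograms instructions out) := by
  unfold Spec_find_subprograms; infer_instance

-- ===== CLAIM (what is proved, stated in full; the proofs are below) =====
def Claim_equal_find_subprograms : Prop :=
  ∀ (instructions : List (String × Int)), Dom_find_subprograms instructions →
    Pre_find_subprograms instructions →
    Spec_find_subprograms instructions (find_subprograms instructions)

-- ===== LEMMAS AND PROOFS =====

-- [0, 1, ..., n-1] as a list of Ints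
def pvRangeI (n : Nat) : List Int := (List.range n).map (fun (k : Nat) => (k : Int))

-- the jump target of position k
def pvNxt (ins : List (String × Int)) (k : Nat) : Int :=
  if (ins.getD k ("", 0)).1 == "jmp" then (k : Int) + (ins.getD k ("", 0)).2
  else (k : Int) + 1

-- undirected edge relation of A's graph / B's sweeps
def pvEdge (ins : List (String × Int)) (u v : Int) : Prop :=
  0 ≤ u ∧ u < ins.length ∧ 0 ≤ v ∧ v < ins.length ∧
  ∃ k : Nat, k < ins.length ∧
    ((u = (k : Int) ∧ v = pvNxt ins k) ∨ (v = (k : Int) ∧ u = pvNxt ins k))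

-- connectivity
def pvConn (ins : List (String × Int)) : Int → Int → Prop :=
  Relation.ReflTransGen (pvEdge ins)

-- least element of x's component
noncomputable def pvMrep (ins : List (String × Int)) (x : Int) : Int :=
  ((sInf {k : Nat | pvConn ins x (k : Int)} : Nat) : Int)

-- the component of representative m, listed ascending
noncomputable def pvComp (ins : List (String × Int)) (m : Int) : List Int :=
  (pvRangeI ins.length).filter (fun x => decide (pvMrep ins x = m))

-- the ascending list of component representatives
noncomputable def pvM0 (ins : List (String × Int)) : List Int :=
  (pvRangeI ins.length).filter (fun x => decide (pvMrep ins x = x))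

-- ---------- generic small lemmas ----------
lemma pvRangeI_mem (n : Nat) (x : Int) : x ∈ pvRangeI n ↔ 0 ≤ x ∧ x < n := by
  unfold pvRangeI
  rw [List.mem_map]
  constructor
  · rintro ⟨k, hk, rfl⟩
    rw [List.mem_range] at hk
    omega
  · rintro ⟨h0, hn⟩
    refine ⟨x.toNat, ?_, by omega⟩
    rw [List.mem_range]; omega

lemma pvRangeI_nodup (n : Nat) : (pvRangeI n).Nodup := by
  unfold pvRangeI
  exact List.Nodup.map (fun a b h => by exact_mod_cast h) List.nodup_range

lemma pvRangeI_pairwise (n : Nat) : (pvRangeI n).Pairwise (· < ·) := by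
  unfold pvRangeI
  rw [List.pairwise_map]
  exact List.Pairwise.imp (fun h => by exact_mod_cast h) List.pairwise_lt_range

lemma pvRangeI_length (n : Nat) : (pvRangeI n).length = n := by
  unfold pvRangeI; simp

lemma pvComp_mem (ins : List (String × Int)) (m x : Int) :
    x ∈ pvComp ins m ↔ (0 ≤ x ∧ x < (ins.length : Int) ∧ pvMrep ins x = m) := by
  unfold pvComp
  rw [List.mem_filter, pvRangeI_mem, decide_eq_true_iff]
  tauto

lemma pvComp_nodup (ins : List (String × Int)) (m : Int) : (pvComp ins m).Nodup := by
  unfold pvComp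
  exact (pvRangeI_nodup _).filter _

lemma pvComp_pairwise (ins : List (String × Int)) (m : Int) :
    (pvComp ins m).Pairwise (· < ·) := by
  unfold pvComp
  exact (pvRangeI_pairwise _).filter _

lemma pvM0_mem (ins : List (String × Int)) (x : Int) :
    x ∈ pvM0 ins ↔ (0 ≤ x ∧ x < (ins.length : Int) ∧ pvMrep ins x = x) := by
  unfold pvM0
  rw [List.mem_filter, pvRangeI_mem, decide_eq_true_iff]
  tauto

lemma pvM0_nodup (ins : List (String × Int)) : (pvM0 ins).Nodup := by
  unfold pvM0
  exact (pvRangeI_nodup _).filter _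

lemma pvM0_pairwise (ins : List (String × Int)) : (pvM0 ins).Pairwise (· < ·) := by
  unfold pvM0
  exact (pvRangeI_pairwise _).filter _

lemma pvContains_iff (s : PySem.Set Int) (x : Int) : s.contains x = true ↔ x ∈ s := by
  simp [PySem.Set.contains]

lemma pvAdd_append {s : PySem.Set Int} {x : Int} (h : x ∉ s) :
    PySem.Set.add s x = s ++ [x] := by
  unfold PySem.Set.add
  rw [if_neg]
  intro hc
  exact h ((pvContains_iff s x).mp hc)

lemma pvNodup_add {s : PySem.Set Int} (h : s.Nodup) (x : Int) : (PySem.Set.add s x).Nodup := by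
  by_cases hx : x ∈ s
  · unfold PySem.Set.add
    rw [if_pos ((pvContains_iff s x).mpr hx)]
    exact h
  · rw [pvAdd_append hx]
    simp [List.nodup_append, h]
    intro a ha hax
    exact hx (hax ▸ ha)

lemma pvSet_ofList_aux : ∀ (xs acc : List Int), (acc ++ xs).Nodup →
    xs.foldl PySem.Set.add acc = acc ++ xs := by
  intro xs
  induction xs with
  | nil => intro acc _; simp
  | cons x xs ih =>
    intro acc hnd
    have hx : x ∉ acc := by
      intro hmem
      exact (List.disjoint_of_nodup_append hnd) hmem (List.mem_cons_self ..)
    rw [List.foldl_cons, pvAdd_append hx, ih (acc ++ [x]) (by simpa using hnd)]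
    simp

lemma pvSet_ofList_eq_self {xs : List Int} (h : xs.Nodup) : PySem.Set.ofList xs = xs := by
  have := pvSet_ofList_aux xs [] (by simpa using h)
  simpa [PySem.Set.ofList, PySem.Set.empty] using this

lemma pvFilter_not_contains_eq (rem vis : PySem.Set Int) (h : ∀ x ∈ rem, x ∉ vis) :
    rem.filter (fun x => !(vis.contains x)) = rem := by
  rw [List.filter_eq_self]
  intro a ha
  cases hc : vis.contains a with
  | false => simp
  | true => exact absurd ((pvContains_iff _ _).mp hc) (h a ha)

lemma pvGetD_set (l : List Int) (p : Nat) (v : Int) (i : Nat) (hp : p < l.length) :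
    (l.set p v).getD i 0 = if i = p then v else l.getD i 0 := by
  by_cases hip : i = p
  · subst hip
    simp [List.getD_eq_getElem?_getD, hp]
  · simp [List.getD_eq_getElem?_getD, List.getElem?_set_ne (fun h => hip h.symm), hip]

lemma pvGetD_set2 (l : List Int) (p q : Nat) (v : Int) (i : Nat)
    (hp : p < l.length) (hq : q < l.length) :
    ((l.set p v).set q v).getD i 0 = if i = q ∨ i = p then v else l.getD i 0 := by
  rw [pvGetD_set _ _ _ _ (by simpa using hq), pvGetD_set _ _ _ _ hp]
  by_cases h1 : i = q
  · simp [h1]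
  · by_cases h2 : i = p <;> simp [h1, h2]

lemma pvSum_lt : ∀ (a b : List Int), a.length = b.length →
    (∀ i : Nat, a.getD i 0 ≤ b.getD i 0) →
    a.sum ≤ b.sum ∧ (a ≠ b → a.sum < b.sum) := by
  intro a
  induction a with
  | nil =>
    intro b hlen _
    cases b with
    | nil => simp
    | cons y ys => simp at hlen
  | cons x xs ih =>
    intro b hlen hle
    cases b with
    | nil => simp at hlen
    | cons y ys =>
      have h0 : x ≤ y := by simpa using hle 0
      have htail : ∀ i : Nat, xs.getD i 0 ≤ ys.getD i 0 := by
        intro i; simpa using hle (i + 1)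
      have hlen' : xs.length = ys.length := by simpa using hlen
      obtain ⟨hle', hlt'⟩ := ih ys hlen' htail
      constructor
      · simp only [List.sum_cons]; omega
      · intro hne
        by_cases hxy : x = y
        · subst hxy
          have hts : xs ≠ ys := by
            intro h; exact hne (by rw [h])
          simp only [List.sum_cons]
          have := hlt' hts; omega
        · have : x < y := lt_of_le_of_ne h0 hxy
          simp only [List.sum_cons]; omega

-- ---------- facts about the edge relation ----------
lemma pvEdge_symm {ins : List (String × Int)} {u v : Int}
    (h : pvEdge ins u v) : pvEdge ins v u := by
  obtain ⟨a, b, c, d, k, hk, hor⟩ := h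
  exact ⟨c, d, a, b, k, hk, hor.symm⟩

lemma pvConn_symm {ins : List (String × Int)} {u v : Int}
    (h : pvConn ins u v) : pvConn ins v u := by
  induction h with
  | refl => exact Relation.ReflTransGen.refl
  | tail _ e ih => exact Relation.ReflTransGen.trans (Relation.ReflTransGen.single (pvEdge_symm e)) ih

lemma pvConn_bounds {ins : List (String × Int)} {x y : Int}
    (h : pvConn ins x y) : x = y ∨ (0 ≤ y ∧ y < ins.length) := by
  induction h with
  | refl => exact Or.inl rfl
  | tail _ e _ => exact Or.inr ⟨e.2.2.1, e.2.2.2.1⟩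

lemma pvConn_setNonempty {ins : List (String × Int)} {x : Int}
    (h0 : 0 ≤ x) : {k : Nat | pvConn ins x (k : Int)}.Nonempty := by
  refine ⟨x.toNat, ?_⟩
  show pvConn ins x ((x.toNat : Nat) : Int)
  rw [Int.toNat_of_nonneg h0]
  exact Relation.ReflTransGen.refl

lemma pvMrep_conn {ins : List (String × Int)} {x : Int}
    (h0 : 0 ≤ x) : pvConn ins x (pvMrep ins x) := by
  have := Nat.sInf_mem (pvConn_setNonempty (ins := ins) h0)
  exact this

lemma pvMrep_le {ins : List (String × Int)} {x : Int}
    (h0 : 0 ≤ x) : pvMrep ins x ≤ x := by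
  have hmem : x.toNat ∈ {k : Nat | pvConn ins x (k : Int)} := by
    show pvConn ins x ((x.toNat : Nat) : Int)
    rw [Int.toNat_of_nonneg h0]
    exact Relation.ReflTransGen.refl
  have := Nat.sInf_le hmem
  unfold pvMrep
  omega

lemma pvMrep_nonneg (ins : List (String × Int)) (x : Int) : 0 ≤ pvMrep ins x :=
  Int.natCast_nonneg _

lemma pvMrep_le_of_conn {ins : List (String × Int)} {x y : Int}
    (hy : 0 ≤ y) (h : pvConn ins x y) : pvMrep ins x ≤ y := by
  have hmem : y.toNat ∈ {k : Nat | pvConn ins x (k : Int)} := by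
    show pvConn ins x ((y.toNat : Nat) : Int)
    rw [Int.toNat_of_nonneg hy]
    exact h
  have := Nat.sInf_le hmem
  unfold pvMrep
  omega

lemma pvMrep_eq_of_conn {ins : List (String × Int)} {x y : Int}
    (h : pvConn ins x y) : pvMrep ins x = pvMrep ins y := by
  unfold pvMrep
  congr 2
  ext k
  constructor
  · intro hk
    exact Relation.ReflTransGen.trans (pvConn_symm h) hk
  · intro hk
    exact Relation.ReflTransGen.trans h hk

lemma pvMrep_bounds {ins : List (String × Int)} {x : Int}
    (h0 : 0 ≤ x) (hn : x < ins.length) :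
    0 ≤ pvMrep ins x ∧ pvMrep ins x < ins.length := by
  refine ⟨pvMrep_nonneg ins x, ?_⟩
  rcases pvConn_bounds (pvMrep_conn (ins := ins) h0) with h | h
  · omega
  · exact h.2

lemma pvMrep_fix {ins : List (String × Int)} {x : Int}
    (h0 : 0 ≤ x) :
    pvMrep ins (pvMrep ins x) = pvMrep ins x :=
  (pvMrep_eq_of_conn (pvMrep_conn (ins := ins) h0)).symm

lemma pvNxt_nonneg {ins : List (String × Int)} (hP : Pre_find_subprograms ins)
    {k : Nat} (hk : k < ins.length) : 0 ≤ pvNxt ins k := by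
  unfold pvNxt
  rw [List.getD_eq_getElem ins ("", 0) hk]
  by_cases hj : (ins[k]).1 = "jmp"
  · rw [if_pos (by simpa using hj)]
    exact hP k hk hj
  · rw [if_neg (by simpa using hj)]
    omega

lemma pvConn_rep_iff {ins : List (String × Int)} {m x : Int}
    (hm0 : 0 ≤ m) (hmn : m < ins.length) (hrep : pvMrep ins m = m) :
    pvConn ins m x ↔ (0 ≤ x ∧ x < ins.length ∧ pvMrep ins x = m) := by
  constructor
  · intro h
    have hx : 0 ≤ x ∧ x < ins.length := by
      rcases pvConn_bounds h with rfl | hb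
      · exact ⟨hm0, hmn⟩
      · exact hb
    refine ⟨hx.1, hx.2, ?_⟩
    rw [← pvMrep_eq_of_conn h, hrep]
  · rintro ⟨hx0, hxn, hx⟩
    have : pvConn ins x (pvMrep ins x) := pvMrep_conn hx0
    rw [hx] at this
    exact pvConn_symm this

-- ---------- the sweep (port B) ----------
def pvStep (ins : List (String × Int)) (l : List Int) (e : Int × (String × Int)) : List Int :=
  let next_pc := if e.2.1 == "jmp" then e.1 + e.2.2 else e.1 + 1
  if next_pc < PySem.List.len ins then
    let m := min (PySem.List.pyGetD l e.1 0) (PySem.List.pyGetD l next_pc 0)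
    PySem.List.pySetD (PySem.List.pySetD l e.1 m) next_pc m
  else l

lemma pvSweep_eq_foldl (ins : List (String × Int)) (l : List Int) :
    pvSweep ins l = (PySem.List.enumerate ins).foldl (pvStep ins) l := rfl

def pvValid (ins : List (String × Int)) (e : Int × (String × Int)) : Prop :=
  ∃ k : Nat, ∃ h : k < ins.length, e = ((k : Int), ins[k])

lemma pvValid_of_mem {ins : List (String × Int)} {e : Int × (String × Int)}
    (h : e ∈ PySem.List.enumerate ins) : pvValid ins e := by
  rw [PySem.List.mem_enumerate_iff] at h
  obtain ⟨k, hk, he⟩ := h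
  exact ⟨k, hk, by simpa using he⟩

lemma pvMem_enumerate {ins : List (String × Int)} {k : Nat} (h : k < ins.length) :
    ((k : Int), ins[k]) ∈ PySem.List.enumerate ins := by
  rw [PySem.List.mem_enumerate_iff]
  exact ⟨k, h, by simp⟩

lemma pvNext_eq {ins : List (String × Int)} {k : Nat} (h : k < ins.length) :
    pvNext (k : Int) (ins[k]) = pvNxt ins k := by
  unfold pvNext pvNxt pvJMP
  rw [List.getD_eq_getElem ins ("", 0) h]

lemma pvStep_eq {ins : List (String × Int)} (hP : Pre_find_subprograms ins)
    (l : List Int) {k : Nat} (hk : k < ins.length) :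
    pvStep ins l ((k : Int), ins[k]) =
      if pvNxt ins k < (ins.length : Int) then
        (l.set k (min (l.getD k 0) (l.getD (pvNxt ins k).toNat 0))).set
          (pvNxt ins k).toNat (min (l.getD k 0) (l.getD (pvNxt ins k).toNat 0))
      else l := by
  have hnx : (if (ins[k]).1 == "jmp" then (k : Int) + (ins[k]).2 else (k : Int) + 1)
      = pvNxt ins k := by
    unfold pvNxt
    rw [List.getD_eq_getElem ins ("", 0) hk]
  simp only [pvStep]
  rw [hnx, PySem.List.len_eq]
  by_cases hlt : pvNxt ins k < (ins.length : Int)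
  · rw [if_pos hlt, if_pos hlt]
    have h0 : 0 ≤ pvNxt ins k := pvNxt_nonneg hP hk
    rw [← Int.toNat_of_nonneg h0]
    simp only [PySem.List.pyGetD_natCast, PySem.List.pySetD_natCast, Int.toNat_natCast]
  · rw [if_neg hlt, if_neg hlt]

-- B's invariant
def pvInv (ins : List (String × Int)) (l : List Int) : Prop :=
  l.length = ins.length ∧
  ∀ k : Nat, k < ins.length →
    pvConn ins (k : Int) (l.getD k 0) ∧ 0 ≤ l.getD k 0 ∧ l.getD k 0 ≤ (k : Int)

lemma pvStep_le {ins : List (String × Int)} (hP : Pre_find_subprograms ins)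
    {l : List Int} (hl : l.length = ins.length)
    {e : Int × (String × Int)} (he : pvValid ins e) :
    (pvStep ins l e).length = l.length ∧
    ∀ i : Nat, (pvStep ins l e).getD i 0 ≤ l.getD i 0 := by
  obtain ⟨k, hk, rfl⟩ := he
  rw [pvStep_eq hP l hk]
  by_cases hlt : pvNxt ins k < (ins.length : Int)
  · rw [if_pos hlt]
    have h0 : 0 ≤ pvNxt ins k := pvNxt_nonneg hP hk
    have hkl : k < l.length := by omega
    have hql : (pvNxt ins k).toNat < l.length := by omega
    constructor
    · simp
    · intro i
      rw [pvGetD_set2 _ _ _ _ _ hkl hql]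
      by_cases h1 : i = (pvNxt ins k).toNat ∨ i = k
      · rw [if_pos h1]
        rcases h1 with rfl | rfl
        · exact min_le_right _ _
        · exact min_le_left _ _
      · rw [if_neg h1]
  · rw [if_neg hlt]
    exact ⟨rfl, fun i => le_refl _⟩

lemma pvStep_inv {ins : List (String × Int)} (hP : Pre_find_subprograms ins)
    {l : List Int} (hl : pvInv ins l)
    {e : Int × (String × Int)} (he : pvValid ins e) :
    pvInv ins (pvStep ins l e) := by
  obtain ⟨k, hk, rfl⟩ := he
  rw [pvStep_eq hP l hk]
  by_cases hlt : pvNxt ins k < (ins.length : Int)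
  · rw [if_pos hlt]
    obtain ⟨hlen, hinv⟩ := hl
    have h0 : 0 ≤ pvNxt ins k := pvNxt_nonneg hP hk
    have hkl : k < l.length := by omega
    have hql : (pvNxt ins k).toNat < l.length := by omega
    have hqn : (pvNxt ins k).toNat < ins.length := by omega
    have hqcast : (((pvNxt ins k).toNat : Nat) : Int) = pvNxt ins k := Int.toNat_of_nonneg h0
    have hedge : pvEdge ins (k : Int) (pvNxt ins k) :=
      ⟨by omega, by omega, h0, hlt, k, hk, Or.inl ⟨rfl, rfl⟩⟩
    have hck : pvConn ins (k : Int) (l.getD k 0) := (hinv k hk).1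
    have hcq : pvConn ins (pvNxt ins k) (l.getD (pvNxt ins k).toNat 0) := by
      have := (hinv (pvNxt ins k).toNat hqn).1
      rwa [hqcast] at this
    have hconnk : pvConn ins (k : Int) (min (l.getD k 0) (l.getD (pvNxt ins k).toNat 0)) := by
      rcases min_choice (l.getD k 0) (l.getD (pvNxt ins k).toNat 0) with h | h
      · rw [h]; exact hck
      · rw [h]; exact Relation.ReflTransGen.trans (Relation.ReflTransGen.single hedge) hcq
    have hconnq : pvConn ins (pvNxt ins k) (min (l.getD k 0) (l.getD (pvNxt ins k).toNat 0)) := by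
      rcases min_choice (l.getD k 0) (l.getD (pvNxt ins k).toNat 0) with h | h
      · rw [h]
        exact Relation.ReflTransGen.trans (Relation.ReflTransGen.single (pvEdge_symm hedge)) hck
      · rw [h]; exact hcq
    constructor
    · simpa using hlen
    · intro j hj
      rw [pvGetD_set2 _ _ _ _ _ hkl hql]
      by_cases hcase : j = (pvNxt ins k).toNat ∨ j = k
      · rw [if_pos hcase]
        have hmin0 : 0 ≤ min (l.getD k 0) (l.getD (pvNxt ins k).toNat 0) :=
          le_min (hinv k hk).2.1 (hinv (pvNxt ins k).toNat hqn).2.1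
        rcases hcase with he | he
        · rw [he]
          refine ⟨by rw [hqcast]; exact hconnq, hmin0, ?_⟩
          have := (hinv (pvNxt ins k).toNat hqn).2.2
          have h2 := min_le_right (l.getD k 0) (l.getD (pvNxt ins k).toNat 0)
          omega
        · rw [he]
          refine ⟨hconnk, hmin0, ?_⟩
          have := (hinv k hk).2.2
          have h2 := min_le_left (l.getD k 0) (l.getD (pvNxt ins k).toNat 0)
          omega
      · rw [if_neg hcase]
        exact hinv j hj
  · rw [if_neg hlt]
    exact hl

lemma pvFold_le {ins : List (String × Int)} (hP : Pre_find_subprograms ins) :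
    ∀ (es : List (Int × (String × Int))) (l : List Int),
    (∀ e ∈ es, pvValid ins e) → l.length = ins.length →
    (es.foldl (pvStep ins) l).length = l.length ∧
    ∀ i : Nat, (es.foldl (pvStep ins) l).getD i 0 ≤ l.getD i 0 := by
  intro es
  induction es with
  | nil => intro l _ _; exact ⟨rfl, fun i => le_refl _⟩
  | cons e es ih =>
    intro l hval hl
    obtain ⟨hslen, hsle⟩ := pvStep_le hP hl (hval e (List.mem_cons_self ..))
    obtain ⟨hlen', hle'⟩ := ih (pvStep ins l e)
      (fun e' he' => hval e' (List.mem_cons_of_mem _ he')) (hslen.trans hl)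
    refine ⟨?_, ?_⟩
    · rw [List.foldl_cons, hlen', hslen]
    · intro i
      rw [List.foldl_cons]
      exact le_trans (hle' i) (hsle i)

lemma pvSweep_le {ins : List (String × Int)} (hP : Pre_find_subprograms ins)
    {l : List Int} (hl : l.length = ins.length) :
    (pvSweep ins l).length = l.length ∧
    ∀ i : Nat, (pvSweep ins l).getD i 0 ≤ l.getD i 0 := by
  rw [pvSweep_eq_foldl]
  exact pvFold_le hP _ l (fun e he => pvValid_of_mem he) hl

lemma pvSweep_inv {ins : List (String × Int)} (hP : Pre_find_subprograms ins)
    {l : List Int} (hl : pvInv ins l) : pvInv ins (pvSweep ins l) := by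
  rw [pvSweep_eq_foldl]
  have haux : ∀ (es : List (Int × (String × Int))) (l : List Int),
      (∀ e ∈ es, pvValid ins e) → pvInv ins l → pvInv ins (es.foldl (pvStep ins) l) := by
    intro es
    induction es with
    | nil => intro l _ h; exact h
    | cons e es ih =>
      intro l hval hl
      rw [List.foldl_cons]
      exact ih _ (fun e' he' => hval e' (List.mem_cons_of_mem _ he'))
        (pvStep_inv hP hl (hval e (List.mem_cons_self ..)))
  exact haux _ l (fun e he => pvValid_of_mem he) hl

lemma pvEq_of_le_le {a b : List Int} (hlen : a.length = b.length)
    (h1 : ∀ i : Nat, a.getD i 0 ≤ b.getD i 0)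
    (h2 : ∀ i : Nat, b.getD i 0 ≤ a.getD i 0) : a = b := by
  apply List.ext_getElem hlen
  intro i hi hi'
  have ha : a[i] = a.getD i 0 := (List.getD_eq_getElem a 0 hi).symm
  have hb : b[i] = b.getD i 0 := (List.getD_eq_getElem b 0 hi').symm
  rw [ha, hb]
  exact le_antisymm (h1 i) (h2 i)

lemma pvFold_fix {ins : List (String × Int)} (hP : Pre_find_subprograms ins)
    {L : List Int} (hL : L.length = ins.length) :
    ∀ (es : List (Int × (String × Int))) (cur : List Int),
    (∀ e ∈ es, pvValid ins e) → cur.length = L.length →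
    (∀ i : Nat, cur.getD i 0 ≤ L.getD i 0) →
    es.foldl (pvStep ins) cur = L →
    cur = L ∧ ∀ e ∈ es, pvStep ins L e = L := by
  intro es
  induction es with
  | nil =>
    intro cur _ _ _ hfold
    exact ⟨hfold, by simp⟩
  | cons e es ih =>
    intro cur hval hclen hcle hfold
    rw [List.foldl_cons] at hfold
    obtain ⟨hslen, hsle⟩ := pvStep_le hP (hclen.trans hL) (hval e (List.mem_cons_self ..))
    obtain ⟨hcur', hes⟩ := ih (pvStep ins cur e)
      (fun e' he' => hval e' (List.mem_cons_of_mem _ he'))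
      (hslen.trans hclen) (fun i => le_trans (hsle i) (hcle i)) hfold
    have hceq : cur = L := by
      apply pvEq_of_le_le hclen hcle
      intro i
      rw [← hcur']
      exact hsle i
    subst hceq
    refine ⟨rfl, ?_⟩
    intro e' he'
    rcases List.mem_cons.mp he' with rfl | hmem
    · exact hcur'
    · exact hes e' hmem

lemma pvSweep_fix_edge {ins : List (String × Int)} (hP : Pre_find_subprograms ins)
    {l : List Int} (hl : l.length = ins.length) (hfix : pvSweep ins l = l)
    {k : Nat} (hk : k < ins.length) (hlt : pvNxt ins k < (ins.length : Int)) :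
    l.getD k 0 = l.getD (pvNxt ins k).toNat 0 := by
  rw [pvSweep_eq_foldl] at hfix
  obtain ⟨-, hsteps⟩ := pvFold_fix hP hl (PySem.List.enumerate ins) l
    (fun e he => pvValid_of_mem he) rfl (fun i => le_refl _) hfix
  have hstep := hsteps _ (pvMem_enumerate hk)
  rw [pvStep_eq hP l hk, if_pos hlt] at hstep
  have h0 : 0 ≤ pvNxt ins k := pvNxt_nonneg hP hk
  have hkl : k < l.length := by omega
  have hql : (pvNxt ins k).toNat < l.length := by omega
  have h1 : l.getD k 0 = min (l.getD k 0) (l.getD (pvNxt ins k).toNat 0) := by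
    conv_lhs => rw [← hstep]
    rw [pvGetD_set2 _ _ _ _ _ hkl hql]
    simp
  have h2 : l.getD (pvNxt ins k).toNat 0 = min (l.getD k 0) (l.getD (pvNxt ins k).toNat 0) := by
    conv_lhs => rw [← hstep]
    rw [pvGetD_set2 _ _ _ _ _ hkl hql]
    simp
  exact h1.trans h2.symm

lemma pvInv_sum_nonneg {ins : List (String × Int)} {l : List Int}
    (h : pvInv ins l) : 0 ≤ l.sum := by
  obtain ⟨hlen, hinv⟩ := h
  apply List.sum_nonneg
  intro x hx
  obtain ⟨i, hi, rfl⟩ := List.mem_iff_getElem.mp hx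
  have := (hinv i (by omega)).2.1
  rwa [List.getD_eq_getElem l 0 hi] at this

lemma pvPropagate_fix {ins : List (String × Int)} (hP : Pre_find_subprograms ins) :
    ∀ (fuel : Nat) (l : List Int), pvInv ins l → l.sum.toNat < fuel →
    pvInv ins (pvPropagate ins fuel l) ∧
    pvSweep ins (pvPropagate ins fuel l) = pvPropagate ins fuel l := by
  intro fuel
  induction fuel with
  | zero => intro l _ hf; omega
  | succ fuel ih =>
    intro l hInv hf
    simp only [pvPropagate]
    by_cases heq : pvSweep ins l = l
    · rw [if_pos (by simpa using heq)]
      exact ⟨hInv, heq⟩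
    · rw [if_neg (by simpa using heq)]
      have hInv' := pvSweep_inv hP hInv
      obtain ⟨hslen, hsle⟩ := pvSweep_le hP hInv.1
      have hlt : (pvSweep ins l).sum < l.sum :=
        (pvSum_lt _ _ hslen hsle).2 heq
      have h0 : 0 ≤ (pvSweep ins l).sum := pvInv_sum_nonneg hInv'
      exact ih _ hInv' (by omega)

-- the initial labels
lemma pvInit_labels (ins : List (String × Int)) :
    PySem.List.pyRange 0 (PySem.List.len ins) 1 = pvRangeI ins.length := by
  rw [PySem.List.len_eq, PySem.List.pyRange_zero_natCast]
  unfold pvRangeI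
  rfl

lemma pvInv_init (ins : List (String × Int)) : pvInv ins (pvRangeI ins.length) := by
  refine ⟨pvRangeI_length _, ?_⟩
  intro k hk
  have hg : (pvRangeI ins.length).getD k 0 = (k : Int) := by
    unfold pvRangeI
    exact PySem.List.getD_map_range _ _ _ _ hk
  rw [hg]
  exact ⟨Relation.ReflTransGen.refl, by omega, le_refl _⟩

lemma pvNatRange_sum_le (n : Nat) : (List.range n).sum ≤ n * n := by
  induction n with
  | zero => simp
  | succ n ih =>
    rw [List.range_succ, List.sum_append]
    simp only [List.sum_cons, List.sum_nil]
    nlinarith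

lemma pvInit_sum (n : Nat) : (pvRangeI n).sum.toNat < n * n + 1 := by
  have hcast : ∀ l : List Nat, (l.map (fun (k : Nat) => (k : Int))).sum = (l.sum : Int) := by
    intro l
    induction l with
    | nil => simp
    | cons a l ihl =>
      simp only [List.map_cons, List.sum_cons, ihl]
      omega
  have h1 : (pvRangeI n).sum = ((List.range n).sum : Int) := by
    unfold pvRangeI; exact hcast _
  have h2 := pvNatRange_sum_le n
  rw [h1]
  omega

-- the final labels are exactly the component minima
lemma pvConn_label {ins : List (String × Int)} (hP : Pre_find_subprograms ins)
    {L : List Int} (hlen : L.length = ins.length) (hfix : pvSweep ins L = L)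
    {u v : Int} (h : pvConn ins u v) :
    L.getD u.toNat 0 = L.getD v.toNat 0 := by
  induction h with
  | refl => rfl
  | tail _ e ih =>
    rename_i b c _
    obtain ⟨hb0, hbn, hc0, hcn, k, hk, hor⟩ := e
    rcases hor with ⟨rfl, rfl⟩ | ⟨rfl, rfl⟩
    · rw [ih]
      have := pvSweep_fix_edge hP hlen hfix hk hcn
      simpa using this
    · rw [ih]
      have := pvSweep_fix_edge hP hlen hfix hk hbn
      simpa using this.symm

lemma pvLabels_eq_mrep {ins : List (String × Int)} (hP : Pre_find_subprograms ins)
    {L : List Int} (hI : pvInv ins L) (hfix : pvSweep ins L = L) :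
    ∀ k : Nat, k < ins.length → L.getD k 0 = pvMrep ins (k : Int) := by
  intro k hk
  have hx0 : (0 : Int) ≤ (k : Int) := by omega
  have hmb : 0 ≤ pvMrep ins (k : Int) ∧ pvMrep ins (k : Int) < ins.length :=
    pvMrep_bounds hx0 (by omega)
  have hconn : pvConn ins (k : Int) (pvMrep ins (k : Int)) := pvMrep_conn hx0
  have h1 : L.getD k 0 = L.getD (pvMrep ins (k : Int)).toNat 0 := by
    have := pvConn_label hP hI.1 hfix hconn
    simpa using this
  have h2 : L.getD (pvMrep ins (k : Int)).toNat 0 ≤ pvMrep ins (k : Int) := by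
    have := (hI.2 (pvMrep ins (k : Int)).toNat (by omega)).2.2
    omega
  have h3 : pvMrep ins (k : Int) ≤ L.getD k 0 := by
    have hc := (hI.2 k hk).1
    have h0 := (hI.2 k hk).2.1
    exact pvMrep_le_of_conn h0 hc
  omega

-- ---------- the graph (port A) ----------
def pvGStep (ins : List (String × Int)) (g : PySem.Dict Int (List Int))
    (e : Int × (String × Int)) : PySem.Dict Int (List Int) :=
  let next_pc := pvNext e.1 e.2
  if next_pc < PySem.List.len ins then
    (g.modify e.1 [] (· ++ [next_pc])).modify next_pc [] (· ++ [e.1])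
  else g

lemma pvGraph_eq_foldl (ins : List (String × Int)) :
    undirected_graph ins =
      (PySem.List.enumerate ins).foldl (pvGStep ins) (pvGraphInit (PySem.List.len ins)) := rfl

lemma pvGraphInit_getD (n : Int) (v : Int) : (pvGraphInit n).getD v [] = [] := by
  unfold pvGraphInit
  have haux : ∀ (xs : List Int) (d : PySem.Dict Int (List Int)),
      (∀ u : Int, d.getD u [] = []) →
      ∀ u : Int, (xs.foldl (fun d pc => d.insert pc ([] : List Int)) d).getD u [] = [] := by
    intro xs
    induction xs with
    | nil => intro d hd u; exact hd u
    | cons x xs ih =>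
      intro d hd u
      rw [List.foldl_cons]
      apply ih
      intro u'
      rw [PySem.Dict.getD_insert]
      split
      · rfl
      · exact hd u'
  apply haux
  intro u
  simp [PySem.Dict.getD_empty]

lemma pvMem_modify (d : PySem.Dict Int (List Int)) (k x v y : Int) :
    y ∈ (d.modify k [] (· ++ [x])).getD v [] ↔ (y ∈ d.getD v [] ∨ (v = k ∧ y = x)) := by
  rw [PySem.Dict.getD_modify]
  by_cases h : v = k
  · subst h
    rw [if_pos rfl]
    simp [List.mem_append]
  · rw [if_neg h]
    simp [h]

def pvContrib (ins : List (String × Int)) (e : Int × (String × Int)) (v w : Int) : Prop :=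
  pvNext e.1 e.2 < ins.length ∧
  ((v = e.1 ∧ w = pvNext e.1 e.2) ∨ (v = pvNext e.1 e.2 ∧ w = e.1))

lemma pvGFold_char (ins : List (String × Int)) :
    ∀ (es : List (Int × (String × Int))) (d : PySem.Dict Int (List Int)) (v w : Int),
    w ∈ (es.foldl (pvGStep ins) d).getD v [] ↔
      (w ∈ d.getD v [] ∨ ∃ e ∈ es, pvContrib ins e v w) := by
  intro es
  induction es with
  | nil => intro d v w; simp
  | cons e es ih =>
    intro d v w
    rw [List.foldl_cons, ih]
    have hstep : w ∈ (pvGStep ins d e).getD v [] ↔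
        (w ∈ d.getD v [] ∨ pvContrib ins e v w) := by
      unfold pvGStep pvContrib
      rw [PySem.List.len_eq]
      by_cases hlt : pvNext e.1 e.2 < (ins.length : Int)
      · rw [if_pos hlt]
        rw [pvMem_modify, pvMem_modify]
        have hT : pvNext e.1 e.2 < (ins.length : Int) := hlt
        tauto
      · rw [if_neg hlt]
        constructor
        · intro h; exact Or.inl h
        · rintro (h | ⟨h, -⟩)
          · exact h
          · exact absurd h hlt
    rw [hstep]
    constructor
    · rintro ((h | h) | h)
      · exact Or.inl h
      · exact Or.inr ⟨e, List.mem_cons_self .., h⟩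
      · obtain ⟨e', he', hc⟩ := h
        exact Or.inr ⟨e', List.mem_cons_of_mem _ he', hc⟩
    · rintro (h | ⟨e', he', hc⟩)
      · exact Or.inl (Or.inl h)
      · rcases List.mem_cons.mp he' with rfl | hmem
        · exact Or.inl (Or.inr hc)
        · exact Or.inr ⟨e', hmem, hc⟩

lemma pvContrib_iff {ins : List (String × Int)} {k : Nat} (hk : k < ins.length) (v w : Int) :
    pvContrib ins ((k : Int), ins[k]) v w ↔
      (pvNxt ins k < (ins.length : Int) ∧
        ((v = (k : Int) ∧ w = pvNxt ins k) ∨ (v = pvNxt ins k ∧ w = (k : Int)))) := by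
  unfold pvContrib
  have h : pvNext ((k : Int), ins[k]).1 ((k : Int), ins[k]).2 = pvNxt ins k := pvNext_eq hk
  rw [h]

lemma pvGraph_char {ins : List (String × Int)} (hP : Pre_find_subprograms ins) :
    ∀ v w : Int, w ∈ (undirected_graph ins).getD v [] ↔ pvEdge ins v w := by
  intro v w
  rw [pvGraph_eq_foldl, pvGFold_char, pvGraphInit_getD]
  simp only [List.not_mem_nil, false_or]
  constructor
  · rintro ⟨e, he, hc⟩
    obtain ⟨k, hk, rfl⟩ := pvValid_of_mem he
    rw [pvContrib_iff hk] at hc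
    obtain ⟨hlt, hor⟩ := hc
    have hnn := pvNxt_nonneg hP hk
    rcases hor with ⟨rfl, rfl⟩ | ⟨rfl, rfl⟩
    · exact ⟨by omega, by exact_mod_cast hk, hnn, hlt, k, hk, Or.inl ⟨rfl, rfl⟩⟩
    · exact ⟨hnn, hlt, by omega, by exact_mod_cast hk, k, hk, Or.inr ⟨rfl, rfl⟩⟩
  · rintro ⟨hv0, hvn, hw0, hwn, k, hk, hor⟩
    refine ⟨((k : Int), ins[k]), pvMem_enumerate hk, ?_⟩
    rw [pvContrib_iff hk]
    rcases hor with ⟨rfl, rfl⟩ | ⟨rfl, rfl⟩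
    · exact ⟨hwn, Or.inl ⟨rfl, rfl⟩⟩
    · exact ⟨hvn, Or.inr ⟨rfl, rfl⟩⟩

-- total adjacency length
def pvDegSum (g : PySem.Dict Int (List Int)) (n : Nat) (vis : PySem.Set Int) : Nat :=
  ∑ k ∈ Finset.filter (fun k : Nat => ¬ ((k : Int) ∈ vis)) (Finset.range n),
    (g.getD (k : Int) []).length

lemma pvModSum (n : Nat) (d : PySem.Dict Int (List Int)) (key w : Int) :
    (∑ k ∈ Finset.range n, ((d.modify key [] (· ++ [w])).getD (k : Int) []).length) ≤
    (∑ k ∈ Finset.range n, (d.getD (k : Int) []).length) + 1 := by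
  have hterm : ∀ k ∈ Finset.range n,
      ((d.modify key [] (· ++ [w])).getD (k : Int) []).length
      = (d.getD (k : Int) []).length + (if (k : Int) = key then 1 else 0) := by
    intro k _
    rw [PySem.Dict.getD_modify]
    by_cases h : (k : Int) = key
    · rw [if_pos h, if_pos h, ← h]
      simp
    · rw [if_neg h, if_neg h]
      simp
  rw [Finset.sum_congr rfl hterm, Finset.sum_add_distrib]
  have hbound : (∑ k ∈ Finset.range n, if (k : Int) = key then 1 else 0) ≤ 1 := by
    by_cases hkey : 0 ≤ key
    · have hc : ∀ k ∈ Finset.range n,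
          (if (k : Int) = key then 1 else 0) = (if k = key.toNat then 1 else 0) := by
        intro k _
        by_cases h : (k : Int) = key
        · rw [if_pos h, if_pos (by omega)]
        · rw [if_neg h, if_neg (by omega)]
      rw [Finset.sum_congr rfl hc]
      rw [Finset.sum_ite_eq' (Finset.range n) key.toNat (fun _ => 1)]
      split <;> omega
    · have hc : ∀ k ∈ Finset.range n, (if (k : Int) = key then 1 else 0) = 0 := by
        intro k _
        rw [if_neg (by omega)]
      rw [Finset.sum_congr rfl hc]
      simp
  omega

lemma pvDegSum_le (ins : List (String × Int)) (vis : PySem.Set Int) :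
    pvDegSum (undirected_graph ins) ins.length vis ≤ 2 * ins.length := by
  have hsub : pvDegSum (undirected_graph ins) ins.length vis ≤
      ∑ k ∈ Finset.range ins.length, ((undirected_graph ins).getD (k : Int) []).length :=
    Finset.sum_le_sum_of_subset (Finset.filter_subset _ _)
  have hfold : ∀ (es : List (Int × (String × Int))) (d : PySem.Dict Int (List Int)),
      (∑ k ∈ Finset.range ins.length, ((es.foldl (pvGStep ins) d).getD (k : Int) []).length)
      ≤ (∑ k ∈ Finset.range ins.length, (d.getD (k : Int) []).length) + 2 * es.length := by
    intro es
    induction es with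
    | nil => intro d; simp
    | cons e es ih =>
      intro d
      rw [List.foldl_cons]
      have h1 := ih (pvGStep ins d e)
      have h2 : (∑ k ∈ Finset.range ins.length, ((pvGStep ins d e).getD (k : Int) []).length)
          ≤ (∑ k ∈ Finset.range ins.length, (d.getD (k : Int) []).length) + 2 := by
        unfold pvGStep
        by_cases hlt : pvNext e.1 e.2 < PySem.List.len ins
        · rw [if_pos hlt]
          have ha := pvModSum ins.length (d.modify e.1 [] (· ++ [pvNext e.1 e.2]))
            (pvNext e.1 e.2) e.1
          have hb := pvModSum ins.length d e.1 (pvNext e.1 e.2)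
          omega
        · rw [if_neg hlt]
          omega
      simp only [List.length_cons]
      omega
  have hinit : (∑ k ∈ Finset.range ins.length,
      ((pvGraphInit (PySem.List.len ins)).getD (k : Int) []).length) = 0 := by
    apply Finset.sum_eq_zero
    intro k _
    rw [pvGraphInit_getD]
    rfl
  have hmain := hfold (PySem.List.enumerate ins) (pvGraphInit (PySem.List.len ins))
  rw [PySem.List.length_enumerate] at hmain
  rw [pvGraph_eq_foldl] at hsub
  unfold pvDegSum at hsub ⊢
  rw [pvGraph_eq_foldl]
  omega

lemma pvDegSum_add {g : PySem.Dict Int (List Int)} {n : Nat} {vis : PySem.Set Int} {x : Int}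
    (h0 : 0 ≤ x) (hn : x < n) (hx : x ∉ vis) :
    pvDegSum g n (PySem.Set.add vis x) + (g.getD x []).length = pvDegSum g n vis := by
  unfold pvDegSum
  have hset : Finset.filter (fun k : Nat => ¬ ((k : Int) ∈ PySem.Set.add vis x)) (Finset.range n)
      = (Finset.filter (fun k : Nat => ¬ ((k : Int) ∈ vis)) (Finset.range n)).erase x.toNat := by
    ext k
    simp only [Finset.mem_erase, Finset.mem_filter, Finset.mem_range, PySem.Set.mem_add]
    constructor
    · rintro ⟨hk, hmem⟩
      push_neg at hmem
      exact ⟨by omega, hk, hmem.1⟩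
    · rintro ⟨hne, hk, hmem⟩
      refine ⟨hk, ?_⟩
      push_neg
      exact ⟨hmem, by omega⟩
  rw [hset]
  have hmem : x.toNat ∈ Finset.filter (fun k : Nat => ¬ ((k : Int) ∈ vis)) (Finset.range n) := by
    simp only [Finset.mem_filter, Finset.mem_range]
    refine ⟨by omega, ?_⟩
    rw [Int.toNat_of_nonneg h0]
    exact hx
  have hsum := Finset.sum_erase_add
    (Finset.filter (fun k : Nat => ¬ ((k : Int) ∈ vis)) (Finset.range n))
    (fun k : Nat => (g.getD (k : Int) []).length) hmem
  rw [← hsum]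
  congr 2
  rw [Int.toNat_of_nonneg h0]

-- ---------- BFS (port A) ----------
lemma pvBfs_main (ins : List (String × Int)) (g : PySem.Dict Int (List Int))
    (hg : ∀ v w : Int, w ∈ g.getD v [] ↔ pvEdge ins v w)
    (s : Int) (hs0 : 0 ≤ s) (hsn : s < (ins.length : Int)) :
    ∀ (fuel : Nat) (vis : PySem.Set Int) (queue : List Int) (rem : PySem.Set Int),
    vis.Nodup →
    (∀ x ∈ vis, pvConn ins s x) →
    (∀ x ∈ queue, pvConn ins s x) →
    (∀ x ∈ vis, ∀ w : Int, pvEdge ins x w → w ∈ vis ∨ w ∈ queue) →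
    (s ∈ vis ∨ s ∈ queue) →
    (∀ x ∈ rem, x ∉ vis) →
    queue.length + pvDegSum g ins.length vis < fuel →
    ∃ vis' : PySem.Set Int,
      pvBfs g fuel vis queue rem = (vis', rem.filter (fun x => !(vis'.contains x))) ∧
      (∀ x ∈ vis, x ∈ vis') ∧ vis'.Nodup ∧
      (∀ x ∈ vis', pvConn ins s x) ∧
      (∀ x ∈ vis', ∀ w : Int, pvEdge ins x w → w ∈ vis') ∧ s ∈ vis' := by
  intro fuel
  induction fuel with
  | zero => intro vis queue rem _ _ _ _ _ _ hfuel; omega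
  | succ fuel ih =>
    intro vis queue rem hnd hv1 hv2 hv3 hv4 hdisj hfuel
    cases queue with
    | nil =>
      refine ⟨vis, ?_, fun x hx => hx, hnd, hv1, ?_, ?_⟩
      · show pvBfs g (fuel + 1) vis [] rem = _
        simp only [pvBfs]
        rw [pvFilter_not_contains_eq rem vis hdisj]
      · intro x hx w hw
        rcases hv3 x hx w hw with h | h
        · exact h
        · simp at h
      · rcases hv4 with h | h
        · exact h
        · simp at h
    | cons x rest =>
      simp only [pvBfs]
      by_cases hvx : x ∈ vis
      · rw [if_pos ((pvContains_iff vis x).mpr hvx)]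
        apply ih vis rest rem hnd hv1 (fun y hy => hv2 y (List.mem_cons_of_mem _ hy))
        · intro y hy w hw
          rcases hv3 y hy w hw with h | h
          · exact Or.inl h
          · rcases List.mem_cons.mp h with rfl | h'
            · exact Or.inl hvx
            · exact Or.inr h'
        · rcases hv4 with h | h
          · exact Or.inl h
          · rcases List.mem_cons.mp h with rfl | h'
            · exact Or.inl hvx
            · exact Or.inr h'
        · exact hdisj
        · simp only [List.length_cons] at hfuel
          omega
      · rw [if_neg (fun hc => hvx ((pvContains_iff vis x).mp hc))]
        have hcx : pvConn ins s x := hv2 x (List.mem_cons_self ..)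
        have hbx : 0 ≤ x ∧ x < (ins.length : Int) := by
          rcases pvConn_bounds hcx with rfl | h
          · exact ⟨hs0, hsn⟩
          · exact h
        have hnd2 : (PySem.Set.add vis x).Nodup := pvNodup_add hnd x
        have hv1' : ∀ y ∈ PySem.Set.add vis x, pvConn ins s y := by
          intro y hy
          rcases (PySem.Set.mem_add vis x y).mp hy with h | rfl
          · exact hv1 y h
          · exact hcx
        have hv2' : ∀ y ∈ rest ++ g.getD x [], pvConn ins s y := by
          intro y hy
          rcases List.mem_append.mp hy with h | h
          · exact hv2 y (List.mem_cons_of_mem _ h)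
          · exact Relation.ReflTransGen.tail hcx ((hg x y).mp h)
        have hv3' : ∀ y ∈ PySem.Set.add vis x, ∀ w : Int, pvEdge ins y w →
            w ∈ PySem.Set.add vis x ∨ w ∈ rest ++ g.getD x [] := by
          intro y hy w hw
          rcases (PySem.Set.mem_add vis x y).mp hy with h | rfl
          · rcases hv3 y h w hw with h' | h'
            · exact Or.inl ((PySem.Set.mem_add vis x w).mpr (Or.inl h'))
            · rcases List.mem_cons.mp h' with he | h''
              · exact Or.inl ((PySem.Set.mem_add vis x w).mpr (Or.inr he))
              · exact Or.inr (List.mem_append.mpr (Or.inl h''))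
          · exact Or.inr (List.mem_append.mpr (Or.inr ((hg y w).mpr hw)))
        have hv4' : s ∈ PySem.Set.add vis x ∨ s ∈ rest ++ g.getD x [] := by
          rcases hv4 with h | h
          · exact Or.inl ((PySem.Set.mem_add vis x s).mpr (Or.inl h))
          · rcases List.mem_cons.mp h with he | h'
            · exact Or.inl ((PySem.Set.mem_add vis x s).mpr (Or.inr he))
            · exact Or.inr (List.mem_append.mpr (Or.inl h'))
        have hdisj' : ∀ y ∈ PySem.Set.discard rem x, y ∉ PySem.Set.add vis x := by
          intro y hy hmem
          have hd := (PySem.Set.mem_discard rem x y).mp hy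
          rcases (PySem.Set.mem_add vis x y).mp hmem with h | rfl
          · exact hdisj y hd.1 h
          · exact hd.2 rfl
        have hfuel' : (rest ++ g.getD x []).length + pvDegSum g ins.length (PySem.Set.add vis x)
            < fuel := by
          have hadd := pvDegSum_add (g := g) (n := ins.length) hbx.1
            (by exact_mod_cast hbx.2) hvx
          simp only [List.length_cons] at hfuel
          simp only [List.length_append]
          omega
        obtain ⟨vis', heq, hmono, hnd', hsub', hcl', hs'⟩ :=
          ih (PySem.Set.add vis x) (rest ++ g.getD x []) (PySem.Set.discard rem x)
            hnd2 hv1' hv2' hv3' hv4' hdisj' hfuel'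
        refine ⟨vis', ?_,
          fun y hy => hmono y ((PySem.Set.mem_add vis x y).mpr (Or.inl hy)),
          hnd', hsub', hcl', hs'⟩
        rw [heq]
        have hxvis' : x ∈ vis' := hmono x ((PySem.Set.mem_add vis x x).mpr (Or.inr rfl))
        have hdd : (PySem.Set.discard rem x).filter (fun y => !(vis'.contains y))
            = rem.filter (fun y => !(vis'.contains y)) := by
          unfold PySem.Set.discard
          rw [List.filter_filter]
          apply List.filter_congr
          intro y _
          by_cases hyx : y = x
          · subst hyx
            have hcy : vis'.contains y = true := (pvContains_iff _ _).mpr hxvis'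
            simp [hcy, hxvis']
          · simp [hyx]
        rw [hdd]

lemma pvVis_char {ins : List (String × Int)} {s : Int} {vis' : PySem.Set Int}
    (hsub : ∀ x ∈ vis', pvConn ins s x)
    (hcl : ∀ x ∈ vis', ∀ w : Int, pvEdge ins x w → w ∈ vis') (hs : s ∈ vis') :
    ∀ x : Int, x ∈ vis' ↔ pvConn ins s x := by
  intro x
  constructor
  · exact hsub x
  · intro h
    induction h with
    | refl => exact hs
    | tail _ e ih => exact hcl _ ih _ e

-- ---------- the outer loop ----------
lemma pvOuter_eq {ins : List (String × Int)} (hP : Pre_find_subprograms ins) :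
    ∀ (M : List Int) (fuel : Nat) (comps : List (List Int)),
    M.length < fuel → M.Pairwise (· < ·) →
    (∀ m ∈ M, 0 ≤ m ∧ m < (ins.length : Int) ∧ pvMrep ins m = m) →
    pvOuter (undirected_graph ins) ins.length fuel
      ((pvRangeI ins.length).filter (fun x => decide (pvMrep ins x ∈ M))) comps
      = comps ++ M.map (pvComp ins) := by
  intro M
  induction M with
  | nil =>
    intro fuel comps hf _ _
    cases fuel with
    | zero => omega
    | succ f =>
      have hrem : (pvRangeI ins.length).filter
          (fun x => decide (pvMrep ins x ∈ ([] : List Int))) = [] := by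
        simp
      rw [hrem]
      simp only [pvOuter]
      have hmin : PySem.List.min? ([] : List Int) (fun x => x) = none := by
        rw [PySem.List.min?_eq_none_iff]
      rw [hmin]
      simp
  | cons m M' ihM =>
    intro fuel comps hf hpw hmem
    cases fuel with
    | zero => omega
    | succ f =>
      obtain ⟨hm0, hmn, hmrep⟩ := hmem m (List.mem_cons_self ..)
      have hpw' := List.pairwise_cons.mp hpw
      have hmnotM' : m ∉ M' := fun h => absurd (hpw'.1 m h) (lt_irrefl m)
      have hmM : m ∈ (pvRangeI ins.length).filter
          (fun x => decide (pvMrep ins x ∈ m :: M')) := by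
        rw [List.mem_filter, pvRangeI_mem]
        refine ⟨⟨hm0, hmn⟩, ?_⟩
        simp [hmrep]
      obtain ⟨μ, hμ⟩ : ∃ μ, PySem.List.min? ((pvRangeI ins.length).filter
          (fun x => decide (pvMrep ins x ∈ m :: M'))) (fun x => x) = some μ := by
        cases h : PySem.List.min? ((pvRangeI ins.length).filter
            (fun x => decide (pvMrep ins x ∈ m :: M'))) (fun x => x) with
        | none =>
          rw [PySem.List.min?_eq_none_iff] at h
          rw [h] at hmM
          simp at hmM
        | some μ => exact ⟨μ, rfl⟩
      have hμ_mem := PySem.List.min?_mem hμ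
      have hμ_min := PySem.List.min?_isMin hμ
      have hμm : μ = m := by
        have ha : μ ≤ m := hμ_min m hmM
        have hb : m ≤ μ := by
          obtain ⟨hmemR, hdec⟩ := List.mem_filter.mp hμ_mem
          rw [pvRangeI_mem] at hmemR
          have hmrepμ : pvMrep ins μ ∈ m :: M' := of_decide_eq_true hdec
          have hle : pvMrep ins μ ≤ μ := pvMrep_le hmemR.1
          rcases List.mem_cons.mp hmrepμ with h | h
          · omega
          · have := hpw'.1 _ h; omega
        omega
      subst hμm
      simp only [pvOuter]
      rw [hμ]
      dsimp only
      have hg := pvGraph_char hP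
      have hfuel1 : (1 : Nat) + pvDegSum (undirected_graph ins) ins.length PySem.Set.empty
          < 2 * ins.length + 2 := by
        have := pvDegSum_le ins PySem.Set.empty
        omega
      obtain ⟨vis', heq, hmono, hnd', hsub', hcl', hs'⟩ :=
        pvBfs_main ins (undirected_graph ins) hg μ hm0 hmn (2 * ins.length + 2)
          PySem.Set.empty [μ]
          (PySem.Set.discard ((pvRangeI ins.length).filter
            (fun x => decide (pvMrep ins x ∈ μ :: M'))) μ)
          (by simp [PySem.Set.empty])
          (by intro y hy; simp [PySem.Set.empty] at hy)
          (by intro y hy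
              rcases List.mem_cons.mp hy with rfl | h
              · exact Relation.ReflTransGen.refl
              · simp at h)
          (by intro y hy; simp [PySem.Set.empty] at hy)
          (Or.inr (List.mem_cons_self ..))
          (by intro y _; simp [PySem.Set.empty])
          (by simpa using hfuel1)
      have hvchar := pvVis_char hsub' hcl' hs'
      rw [heq]
      dsimp only
      have hcompEq : PySem.List.sorted vis' (fun x => x) = pvComp ins μ := by
        apply PySem.List.sorted_eq_of_perm_of_pairwise_lt
        · apply (List.perm_ext_iff_of_nodup (pvComp_nodup ins μ) hnd').mpr
          intro a
          rw [pvComp_mem, hvchar a, pvConn_rep_iff hm0 hmn hmrep]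
        · exact pvComp_pairwise ins μ
      have hremEq : (PySem.Set.discard ((pvRangeI ins.length).filter
            (fun x => decide (pvMrep ins x ∈ μ :: M'))) μ).filter
            (fun x => !(vis'.contains x))
          = (pvRangeI ins.length).filter (fun x => decide (pvMrep ins x ∈ M')) := by
        unfold PySem.Set.discard
        rw [List.filter_filter, List.filter_filter]
        apply List.filter_congr
        intro y hy
        rw [pvRangeI_mem] at hy
        have hvism : y ∈ vis' ↔ (0 ≤ y ∧ y < (ins.length : Int) ∧ pvMrep ins y = μ) := by
          rw [hvchar y, pvConn_rep_iff hm0 hmn hmrep]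
        by_cases hym : pvMrep ins y = μ
        · have hyv : y ∈ vis' := hvism.mpr ⟨hy.1, hy.2, hym⟩
          simp [hym, hyv, hmnotM']
        · have hyv : y ∉ vis' := fun h => hym (hvism.mp h).2.2
          have hym' : ¬ (y = μ) := by
            intro h; rw [h] at hym; exact hym hmrep
          simp [hym, hym', List.mem_cons]
          exact fun _ => hyv
      rw [hcompEq, hremEq]
      rw [ihM f (comps ++ [pvComp ins μ])
        (by simp only [List.length_cons] at hf; omega) hpw'.2
        (fun m' hm' => hmem m' (List.mem_cons_of_mem _ hm'))]
      simp

-- ---------- assembling the two sides ----------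
lemma pvM0_spec (ins : List (String × Int)) :
    (pvM0 ins).Pairwise (· < ·) ∧
    ∀ m ∈ pvM0 ins, 0 ≤ m ∧ m < (ins.length : Int) ∧ pvMrep ins m = m := by
  exact ⟨pvM0_pairwise ins, fun m hm => (pvM0_mem ins m).mp hm⟩

lemma pvA_eq {ins : List (String × Int)} (hP : Pre_find_subprograms ins) :
    find_subprograms ins = (pvM0 ins).map (pvComp ins) := by
  simp only [find_subprograms]
  rw [pvInit_labels, pvSet_ofList_eq_self (pvRangeI_nodup _)]
  have hfilter : pvRangeI ins.length =
      (pvRangeI ins.length).filter (fun x => decide (pvMrep ins x ∈ pvM0 ins)) := by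
    rw [eq_comm, List.filter_eq_self]
    intro x hx
    rw [decide_eq_true_iff]
    rw [pvRangeI_mem] at hx
    rw [pvM0_mem]
    obtain ⟨hb1, hb2⟩ := pvMrep_bounds hx.1 hx.2
    exact ⟨hb1, hb2, pvMrep_fix hx.1⟩
  rw [hfilter, pvOuter_eq hP (pvM0 ins) (ins.length + 1) []
    (by have h1 := List.length_filter_le (fun x => decide (pvMrep ins x = x)) (pvRangeI ins.length)
        have h2 := pvRangeI_length ins.length
        unfold pvM0
        omega)
    (pvM0_spec ins).1 (pvM0_spec ins).2]
  simp

lemma pvB_eq {ins : List (String × Int)} (hP : Pre_find_subprograms ins) :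
    find_subprograms_alt ins = (pvM0 ins).map (pvComp ins) := by
  simp only [find_subprograms_alt]
  rw [pvInit_labels]
  obtain ⟨hInv, hfix⟩ := pvPropagate_fix hP (ins.length * ins.length + 1)
    (pvRangeI ins.length) (pvInv_init ins) (pvInit_sum ins.length)
  set L := pvPropagate ins (ins.length * ins.length + 1) (pvRangeI ins.length) with hLdef
  have hlab := pvLabels_eq_mrep hP hInv hfix
  have hmins : PySem.List.sorted (PySem.Set.ofList L) (fun x => x) = pvM0 ins := by
    apply PySem.List.sorted_eq_of_perm_of_pairwise_lt
    · apply (List.perm_ext_iff_of_nodup (pvM0_nodup ins)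
        (PySem.Set.nodup_ofList L)).mpr
      intro a
      rw [PySem.Set.mem_ofList, pvM0_mem]
      constructor
      · rintro ⟨ha0, han, hfx⟩
        have hk : a.toNat < ins.length := by omega
        have hgd : L.getD a.toNat 0 = pvMrep ins ((a.toNat : Nat) : Int) := hlab a.toNat hk
        rw [Int.toNat_of_nonneg ha0, hfx] at hgd
        have hlen : a.toNat < L.length := by rw [hInv.1]; exact hk
        have hget : L[a.toNat] = a := by
          rw [← List.getD_eq_getElem L 0 hlen]
          exact hgd
        exact hget ▸ List.getElem_mem hlen
      · intro ha
        obtain ⟨i, hi, rfl⟩ := List.mem_iff_getElem.mp ha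
        have hilen : i < ins.length := by rw [← hInv.1]; exact hi
        have h1 : L[i] = pvMrep ins (i : Int) := by
          rw [← List.getD_eq_getElem L 0 hi]
          exact hlab i hilen
        have hib : (0 : Int) ≤ (i : Int) := by omega
        have hb := pvMrep_bounds hib (show ((i : Int)) < ins.length by omega)
        refine ⟨by rw [h1]; exact hb.1, by rw [h1]; exact hb.2, ?_⟩
        rw [h1]
        exact pvMrep_fix hib
    · exact pvM0_pairwise ins
  rw [hmins]
  apply List.map_congr_left
  intro m _
  have hflt : (pvRangeI ins.length).filter (fun x => PySem.List.pyGetD L x 0 == m)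
      = pvComp ins m := by
    unfold pvComp
    apply List.filter_congr
    intro y hy
    rw [pvRangeI_mem] at hy
    obtain ⟨k, hk, rfl⟩ : ∃ k : Nat, k < ins.length ∧ y = (k : Int) :=
      ⟨y.toNat, by omega, by omega⟩
    rw [PySem.List.pyGetD_natCast, hlab k hk]
    by_cases h : pvMrep ins ((k : Nat) : Int) = m <;> simp [h]
  rw [pvSet_ofList_eq_self ((pvRangeI_nodup _).filter _), hflt]

-- ===== VERDICT (by name: the statement is the Claim_ definition above) =====
theorem find_subprograms_spec : Claim_equal_find_subprograms := by
  intro instructions _hDom hPre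
  unfold Spec_find_subprograms
  rw [pvA_eq hPre, pvB_eq hPre]
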